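-- pv_equiv track=rewrite | github.com/eliottcassidy2000/math | 04-computation/h21_mm1_safe_deletion.py | find_common_vertex
-- ===== SOURCE A (Python) =====
-- def find_common_vertex(cycles_3):
--     """If all 3-cycles share a common vertex, return it. Otherwise None."""
--     if not cycles_3:
--         return None
--     common = None
--     for c in cycles_3:
--         if common is None:
--             common = set(c)
--         else:
--             common = common & set(c)
--         if not common:
--             return None
--     if len(common) >= 1:
--         return min(common)
--     return None
-- ===== SOURCE B (Python) =====
-- def find_common_vertex(cycles_3):
--     """If all 3-cycles share a common vertex, return it. Otherwise None."""
--     if not cycles_3: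
--         return None
--     counts = {}
--     for c in cycles_3:
--         for v in set(c):
--             counts[v] = counts.get(v, 0) + 1
--     n = len(cycles_3)
--     candidates = [v for v in counts if counts[v] == n]
--     return min(candidates) if candidates else None
-- ===== Notes on version B (the rewrite author's own statement) =====
-- stated objective: alternative
-- what changed: Replaces A's running set-intersection loop with early exit by a single counting pass (dict vertex -> number of cycles containing it, deduplicating within each cycle) followed by a selection pass that keeps vertices whose count equals the number of cycles, returning their min.
import Mathlib
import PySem

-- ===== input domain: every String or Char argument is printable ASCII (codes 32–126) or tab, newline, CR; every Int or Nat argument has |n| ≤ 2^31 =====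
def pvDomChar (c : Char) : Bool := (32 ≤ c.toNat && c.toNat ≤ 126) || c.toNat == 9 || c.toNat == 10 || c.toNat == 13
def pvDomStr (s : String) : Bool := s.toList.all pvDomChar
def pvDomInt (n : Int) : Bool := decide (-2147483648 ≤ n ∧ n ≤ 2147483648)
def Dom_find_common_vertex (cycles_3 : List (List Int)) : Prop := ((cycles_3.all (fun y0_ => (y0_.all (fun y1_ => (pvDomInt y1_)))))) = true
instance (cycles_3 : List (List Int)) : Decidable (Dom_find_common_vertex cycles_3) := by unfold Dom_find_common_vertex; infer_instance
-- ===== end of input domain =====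

-- B replaces A's running set intersection by a single counting pass (a dict vertex → number
-- of cycles containing it) followed by a selection pass; objective: alternative decomposition.

-- ===== PORT A =====
-- the for-loop of A after the first iteration has set `common`; checks emptiness each step
def fcvLoop (common : PySem.Set Int) (cs : List (List Int)) : Option Int :=
  match cs with
  | [] => if PySem.Set.len common ≥ 1 then PySem.List.min? common (fun x => x) else none
  | c :: rest =>
      let common' := PySem.Set.inter common (PySem.Set.ofList c)
      if common' = [] then none else fcvLoop common' rest

def find_common_vertex (cycles_3 : List (List Int)) : Option Int :=
  match cycles_3 with
  | [] => none
  | c :: rest =>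
      -- first iteration: common is None, becomes set(c); then 'if not common: return None'
      let common := PySem.Set.ofList c
      if common = [] then none else fcvLoop common rest

-- ===== PORT B =====
def find_common_vertex_alt (cycles_3 : List (List Int)) : Option Int :=
  if cycles_3 = [] then none
  else
    let counts := cycles_3.foldl
      (fun d c => (PySem.Set.ofList c).foldl (fun d v => d.modify v 0 (· + 1)) d)
      PySem.Dict.empty
    let n : Int := cycles_3.length
    let candidates := counts.keys.filter (fun v => counts.getD v 0 == n)
    if candidates = [] then none else PySem.List.min? candidates (fun x => x)

-- ===== PRECONDITION & SPEC =====
def Spec_find_common_vertex (cycles_3 : List (List Int)) (out : Option Int) : Prop := out = find_common_vertex_alt cycles_3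
instance (cycles_3 : List (List Int)) (out : Option Int) : Decidable (Spec_find_common_vertex cycles_3 out) := by unfold Spec_find_common_vertex; infer_instance

-- ===== CLAIM (what is proved, stated in full; the proofs are below) =====
def Claim_equal_find_common_vertex : Prop := ∀ (cycles_3 : List (List Int)), Dom_find_common_vertex cycles_3 → Spec_find_common_vertex cycles_3 (find_common_vertex cycles_3)

-- ===== LEMMAS AND PROOFS =====

-- min over a list of ints is determined by its set of members
theorem pv_min?_ext (xs ys : List Int) (h : ∀ v : Int, v ∈ xs ↔ v ∈ ys) :
    PySem.List.min? xs (fun x => x) = PySem.List.min? ys (fun x => x) := by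
  rcases hx : PySem.List.min? xs (fun x => x) with _ | m
  · rcases hy : PySem.List.min? ys (fun x => x) with _ | m'
    · rfl
    · exfalso
      have := PySem.List.min?_mem hy
      rw [← h] at this
      rw [(PySem.List.min?_eq_none_iff xs _).mp hx] at this
      simp at this
  · rcases hy : PySem.List.min? ys (fun x => x) with _ | m'
    · exfalso
      have := PySem.List.min?_mem hx
      rw [h] at this
      rw [(PySem.List.min?_eq_none_iff ys _).mp hy] at this
      simp at this
    · have hm : m ∈ ys := (h m).mp (PySem.List.min?_mem hx)
      have hm' : m' ∈ xs := (h m').mpr (PySem.List.min?_mem hy)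
      have h1 := PySem.List.min?_isMin hx m' hm'
      have h2 := PySem.List.min?_isMin hy m hm
      simp only [Option.some.injEq]
      exact le_antisymm h1 h2

-- 'if S = [] then none else min? S' is just 'min? S'
theorem pv_if_min? (S : List Int) :
    (if S = [] then none else PySem.List.min? S (fun x => x)) = PySem.List.min? S (fun x => x) := by
  split
  · rename_i h; rw [(PySem.List.min?_eq_none_iff S _).mpr h]
  · rfl

-- characterisation of A's loop: it returns min of the elements of `common` contained in every cycle
theorem fcvLoop_eq_min (cs : List (List Int)) : ∀ common : PySem.Set Int,
    fcvLoop common cs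
      = PySem.List.min? (common.filter (fun v => cs.all (fun cy => cy.contains v))) (fun x => x) := by
  induction cs with
  | nil =>
      intro common
      simp only [fcvLoop, List.all_nil, List.filter_true]
      cases common with
      | nil =>
          rw [if_neg (by simp [PySem.Set.len])]
          exact ((PySem.List.min?_eq_none_iff [] _).mpr rfl).symm
      | cons a t =>
          rw [if_pos (by simp only [PySem.Set.len, List.length_cons]; omega)]
  | cons c rest ih =>
      intro common
      simp only [fcvLoop, PySem.Set.inter, ih]
      have hS : List.filter (fun v => (c :: rest).all fun cy => cy.contains v) common
          = List.filter (fun v => rest.all fun cy => cy.contains v)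
              (List.filter (fun x => (PySem.Set.ofList c).contains x) common) := by
        rw [List.filter_filter]
        apply List.filter_congr
        intro v _
        rw [List.all_cons, Bool.and_comm]
        congr 1
        rw [Bool.eq_iff_iff]
        simp [PySem.Set.mem_ofList]
      rw [hS]
      split
      · rename_i h
        rw [h]
        exact ((PySem.List.min?_eq_none_iff _ _).mpr rfl).symm
      · rfl

-- count of v in the concatenation of the dedup'd cycles is at most the number of cycles
theorem pv_count_flat_le (v : Int) (cs : List (List Int)) :
    List.count v (cs.flatMap (fun cy => PySem.Set.ofList cy)) ≤ cs.length := by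
  induction cs with
  | nil => simp
  | cons c rest ih =>
      simp only [List.flatMap_cons, List.count_append, List.length_cons]
      by_cases hv : v ∈ c
      · have : List.count v (PySem.Set.ofList c) = 1 :=
          List.count_eq_one_of_mem (PySem.Set.nodup_ofList c) ((PySem.Set.mem_ofList c v).mpr hv)
        omega
      · have : List.count v (PySem.Set.ofList c) = 0 :=
          List.count_eq_zero_of_not_mem (fun h => hv ((PySem.Set.mem_ofList c v).mp h))
        omega

-- count reaches the number of cycles exactly when v lies in every cycle
theorem pv_count_flat_eq_iff (v : Int) (cs : List (List Int)) :
    List.count v (cs.flatMap (fun cy => PySem.Set.ofList cy)) = cs.length ↔ ∀ cy ∈ cs, v ∈ cy := by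
  induction cs with
  | nil => simp
  | cons c rest ih =>
      simp only [List.flatMap_cons, List.count_append, List.length_cons]
      have hle := pv_count_flat_le v rest
      by_cases hv : v ∈ c
      · have h1 : List.count v (PySem.Set.ofList c) = 1 :=
          List.count_eq_one_of_mem (PySem.Set.nodup_ofList c) ((PySem.Set.mem_ofList c v).mpr hv)
        rw [h1]
        constructor
        · intro h cy hcy
          rcases List.mem_cons.mp hcy with h' | h'
          · exact h' ▸ hv
          · exact (ih.mp (by omega)) cy h'
        · intro h
          have := ih.mpr (fun cy hcy => h cy (List.mem_cons_of_mem c hcy))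
          omega
      · have h0 : List.count v (PySem.Set.ofList c) = 0 :=
          List.count_eq_zero_of_not_mem (fun h => hv ((PySem.Set.mem_ofList c v).mp h))
        rw [h0]
        constructor
        · intro h; omega
        · intro h; exact absurd (h c (List.mem_cons_self)) hv

theorem find_common_vertex_spec : Claim_equal_find_common_vertex := by
  unfold Claim_equal_find_common_vertex
  intro cycles_3 _
  unfold Spec_find_common_vertex find_common_vertex find_common_vertex_alt
  cases cycles_3 with
  | nil => simp
  | cons c rest =>
      simp only [reduceCtorEq, if_false]
      -- B side: the nested foldl is Counter(flat)
      have hcounts :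
          (c :: rest).foldl
              (fun d cy => (PySem.Set.ofList cy).foldl (fun d v => d.modify v 0 (· + 1)) d)
              PySem.Dict.empty
            = PySem.Dict.counter ((c :: rest).flatMap (fun cy => PySem.Set.ofList cy)) := by
        rw [PySem.Dict.counter_eq_foldl, List.foldl_flatMap]
      rw [hcounts, pv_if_min?, fcvLoop_eq_min]
      by_cases hc : PySem.Set.ofList c = []
      · -- c has no elements: A returns None, and no vertex can reach the full count
        rw [if_pos hc]
        symm
        rw [PySem.List.min?_eq_none_iff, List.filter_eq_nil_iff]
        intro v hv
        have hle := pv_count_flat_le v rest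
        simp only [PySem.Dict.getD_counter, List.flatMap_cons, hc, List.nil_append, beq_iff_eq, List.length_cons]
        intro hbad
        push_cast at hbad
        omega
      · rw [if_neg hc]
        have hfilters : List.filter (fun v => rest.all fun cy => cy.contains v) (PySem.Set.ofList c)
            = List.filter (fun v => (c :: rest).all fun cy => cy.contains v) (PySem.Set.ofList c) := by
          apply List.filter_congr
          intro v hv
          have hvc : v ∈ c := (PySem.Set.mem_ofList c v).mp hv
          simp [List.all_cons, hvc]
        rw [hfilters]
        apply pv_min?_ext
        intro v
        rw [List.mem_filter, List.mem_filter,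
          show ((PySem.Dict.counter ((c :: rest).flatMap fun cy => PySem.Set.ofList cy)).keys : List Int)
            = PySem.Set.ofList ((c :: rest).flatMap fun cy => PySem.Set.ofList cy)
            from PySem.Dict.keys_counter _]
        rw [PySem.Set.mem_ofList]
        constructor
        · rintro ⟨hmem, hall⟩
          have hall' : ∀ cy ∈ (c :: rest), v ∈ cy := by
            intro cy hcy
            have := (List.all_eq_true.mp hall) cy hcy
            simpa using this
          refine ⟨(PySem.Set.mem_ofList _ v).mpr
            (List.mem_flatMap.mpr ⟨c, List.mem_cons_self, (PySem.Set.mem_ofList c v).mpr hmem⟩), ?_⟩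
          rw [PySem.Dict.getD_counter, beq_iff_eq]
          have hct := (pv_count_flat_eq_iff v (c :: rest)).mpr hall'
          simp only [List.flatMap_cons, List.count_append, List.length_cons] at hct ⊢
          push_cast
          omega
        · rintro ⟨hmem, hcnt⟩
          rw [PySem.Dict.getD_counter, beq_iff_eq] at hcnt
          have hcnt' : List.count v ((c :: rest).flatMap fun cy => PySem.Set.ofList cy)
              = (c :: rest).length := by exact_mod_cast hcnt
          have hall' := (pv_count_flat_eq_iff v (c :: rest)).mp hcnt'
          refine ⟨hall' c List.mem_cons_self, ?_⟩
          rw [List.all_eq_true]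
          intro cy hcy
          simpa using hall' cy hcy
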